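-- pv_equiv track=rewrite | github.com/raserhin/project-euler | Problem050.py | find_max
-- ===== SOURCE A (Python) =====
-- def find_max(prime_list, N=1_000_000):
--     max_n = 0
--     current = 0
--     for prime in prime_list:
--         current += prime
--         if current > N:
--             return max_n
--         max_n += 1
--     return 0
-- ===== SOURCE B (Python) =====
-- def find_max(prime_list, N=1_000_000):
--     # Two-pass: build all prefix sums, then scan them back-to-front,
--     # keeping the earliest index whose prefix sum exceeds N (0 if none).
--     sums = []
--     total = 0
--     for p in prime_list:
--         total += p
--         sums.append(total)
--     ans = 0
--     i = len(sums)
--     for c in reversed(sums):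
--         i -= 1
--         if c > N:
--             ans = i
--     return ans
-- ===== Notes on version B (the rewrite author's own statement) =====
-- stated objective: alternative
-- what changed: B first materialises the list of prefix sums in one pass, then scans it back-to-front keeping the earliest index whose prefix sum exceeds N (0 falls out when none does), replacing A's single forward loop with early return.
import Mathlib
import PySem

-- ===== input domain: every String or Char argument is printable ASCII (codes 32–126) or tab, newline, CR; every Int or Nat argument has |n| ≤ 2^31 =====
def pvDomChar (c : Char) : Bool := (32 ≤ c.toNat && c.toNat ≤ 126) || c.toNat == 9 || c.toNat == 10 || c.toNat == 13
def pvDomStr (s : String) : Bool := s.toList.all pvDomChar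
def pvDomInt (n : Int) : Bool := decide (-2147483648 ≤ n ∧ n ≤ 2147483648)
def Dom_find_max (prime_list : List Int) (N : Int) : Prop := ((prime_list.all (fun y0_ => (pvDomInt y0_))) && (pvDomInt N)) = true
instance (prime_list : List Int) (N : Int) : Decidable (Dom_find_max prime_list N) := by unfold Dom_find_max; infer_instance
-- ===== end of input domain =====

-- B builds the prefix-sum list and scans it in reverse for the earliest crossing; same value as A, total.

-- ===== PORT A =====
-- the for loop with early return, as structural recursion over (current, max_n)
def find_max_go (N : Int) : List Int → Int → Int → Int
  | [], _, _ => 0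
  | p :: rest, current, max_n =>
      if current + p > N then max_n else find_max_go N rest (current + p) (max_n + 1)

def find_max (prime_list : List Int) (N : Int) : Int :=
  find_max_go N prime_list 0 0

-- ===== PORT B =====
-- first pass: the list of prefix sums (carrying `total`)
def prefixSums : List Int → Int → List Int
  | [], _ => []
  | p :: rest, total => (total + p) :: prefixSums rest (total + p)

-- second pass: `for c in reversed(sums): i -= 1; if c > N: ans = i`
def find_max_alt (prime_list : List Int) (N : Int) : Int :=
  let sums := prefixSums prime_list 0
  let r := sums.reverse.foldl
    (fun (st : Int × Int) c => (st.1 - 1, if c > N then st.1 - 1 else st.2))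
    ((sums.length : Int), 0)
  r.2

-- ===== PRECONDITION & SPEC =====
def Spec_find_max (prime_list : List Int) (N : Int) (out : Int) : Prop := out = find_max_alt prime_list N
instance (prime_list : List Int) (N : Int) (out : Int) : Decidable (Spec_find_max prime_list N out) := by unfold Spec_find_max; infer_instance

-- ===== CLAIM (what is proved, stated in full; the proofs are below) =====
def Claim_equal_find_max : Prop := ∀ (prime_list : List Int) (N : Int), Dom_find_max prime_list N → Spec_find_max prime_list N (find_max prime_list N)

-- ===== LEMMAS AND PROOFS =====

-- index of the first element exceeding N
def idxGT (N : Int) : List Int → Option Nat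
  | [] => none
  | c :: s => if c > N then some 0 else (idxGT N s).map (· + 1)

theorem find_max_go_eq (N : Int) (l : List Int) : ∀ (cur k : Int),
    find_max_go N l cur k =
      (match idxGT N (prefixSums l cur) with
        | some j => k + (j : Int)
        | none => 0) := by
  induction l with
  | nil => intro cur k; simp [find_max_go, prefixSums, idxGT]
  | cons p rest ih =>
      intro cur k
      simp only [find_max_go, prefixSums, idxGT]
      by_cases h : cur + p > N
      · simp [h]
      · simp only [h, if_false, ih (cur + p) (k + 1)]
        cases hfc : idxGT N (prefixSums rest (cur + p)) with
        | none => simp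
        | some j => simp; ring

theorem foldr_rev (N : Int) (s : List Int) : ∀ (i0 a0 : Int),
    s.foldr (fun c st => (st.1 - 1, if c > N then st.1 - 1 else st.2)) (i0, a0) =
      (i0 - s.length,
        match idxGT N s with
        | some j => i0 - s.length + (j : Int)
        | none => a0) := by
  induction s with
  | nil => intro i0 a0; simp [idxGT]
  | cons c t ih =>
      intro i0 a0
      simp only [List.foldr_cons, ih i0 a0, idxGT]
      by_cases h : c > N
      · simp [h]
        omega
      · simp only [h, if_false, List.length_cons]
        cases hfc : idxGT N t with
        | none => simp; omega
        | some j => simp; exact ⟨by ring, by ring⟩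

-- ===== VERDICT (by name: the statement is the Claim_ definition above) =====
theorem find_max_spec : Claim_equal_find_max := by
  intro prime_list N _
  simp only [Spec_find_max, find_max, find_max_alt]
  rw [List.foldl_reverse]
  have h := foldr_rev N (prefixSums prime_list 0) ((prefixSums prime_list 0).length : Int) 0
  have hg := find_max_go_eq N prime_list 0 0
  rw [h, hg]
  cases idxGT N (prefixSums prime_list 0) <;> simp
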